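-- pv_equiv track=rewrite | github.com/Fidjanis/python | lab_1/first_task.py | sum_not_simple
-- ===== SOURCE A (Python) =====
-- def sum_not_simple(num):
--     sum = 0
--     for i in range(2, num+1):
--         c = True
--         for j in range(2, i):
--             if i % j == 0:
--                 c = False
--                 break
--         if not c and num%i==0:
--             sum += i
--     return sum
-- ===== SOURCE B (Python) =====
-- def sum_not_simple(num):
--     # Sum of composite divisors of num, by enumerating divisor pairs up to sqrt(num).
--     def is_composite(n):
--         j = 2
--         while j * j <= n:
--             if n % j == 0:
--                 return True
--             j += 1
--         return False
--
--     total = 0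
--     d = 1
--     while d * d <= num:
--         if num % d == 0:
--             if is_composite(d):
--                 total += d
--             q = num // d
--             if q != d and is_composite(q):
--                 total += q
--         d += 1
--     return total
-- ===== Notes on version B (the rewrite author's own statement) =====
-- stated objective: faster
-- what changed: Instead of scanning every i in 2..num with an O(i) trial-division primality loop, B enumerates divisor pairs (d, num//d) for d up to sqrt(num) and tests each divisor for compositeness by trial division up to its square root.
import Mathlib
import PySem

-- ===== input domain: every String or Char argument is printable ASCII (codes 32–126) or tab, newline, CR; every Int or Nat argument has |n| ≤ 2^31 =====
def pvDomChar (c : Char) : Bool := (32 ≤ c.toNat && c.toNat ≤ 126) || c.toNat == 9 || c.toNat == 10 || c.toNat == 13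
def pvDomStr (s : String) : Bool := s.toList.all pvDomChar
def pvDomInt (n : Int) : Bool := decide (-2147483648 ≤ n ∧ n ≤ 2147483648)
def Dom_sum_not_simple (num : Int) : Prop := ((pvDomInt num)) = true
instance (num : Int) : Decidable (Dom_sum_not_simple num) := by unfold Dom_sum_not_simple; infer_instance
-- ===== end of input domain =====

-- B replaces A's scan of every i in 2..num (each with a linear trial-division inner loop) by
-- enumerating divisor pairs (d, num//d) for d*d <= num and testing each divisor for
-- compositeness by trial division up to its square root; objective: faster.


def pvCheckC (i : Int) : List Int → Bool
  | [] => true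
  | j :: rest => if PySem.Int.mod i j == 0 then false else pvCheckC i rest

def sum_not_simple (num : Int) : Int :=
  (PySem.List.pyRange 2 (num + 1) 1).foldl
    (fun s i =>
      let c := pvCheckC i (PySem.List.pyRange 2 i 1)
      if !c && (PySem.Int.mod num i == 0) then s + i else s) 0

-- ===== PORT B =====
-- 'while j * j <= n: if n % j == 0: return True; j += 1; return False'
def pvIsCompLoop (n : Int) (j : Int) : Bool :=
  if h : j * j ≤ n then
    if PySem.Int.mod n j == 0 then true else pvIsCompLoop n (j + 1)
  else false
termination_by (n + 1 - j).toNat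
decreasing_by
  have hle : j ≤ n := by nlinarith [mul_self_nonneg j]
  omega

def pvIsComposite (n : Int) : Bool := pvIsCompLoop n 2

-- 'while d * d <= num: …; d += 1'
def pvAltLoop (num : Int) (d : Int) (total : Int) : Int :=
  if h : d * d ≤ num then
    let t1 := if PySem.Int.mod num d == 0 then
        let t2 := if pvIsComposite d then total + d else total
        let q := PySem.Int.floordiv num d
        if q ≠ d && pvIsComposite q then t2 + q else t2
      else total
    pvAltLoop num (d + 1) t1
  else total
termination_by (num + 1 - d).toNat
decreasing_by
  have hle : d ≤ num := by nlinarith [mul_self_nonneg d]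
  omega

def sum_not_simple_alt (num : Int) : Int := pvAltLoop num 1 0


-- ===== PRECONDITION & SPEC =====
def Spec_sum_not_simple (num : Int) (out : Int) : Prop := out = sum_not_simple_alt num
instance (num : Int) (out : Int) : Decidable (Spec_sum_not_simple num out) := by unfold Spec_sum_not_simple; infer_instance

-- ===== CLAIM (what is proved, stated in full; the proofs are below) =====
def Claim_equal_sum_not_simple : Prop := ∀ (num : Int), Dom_sum_not_simple num → Spec_sum_not_simple num (sum_not_simple num)

-- ===== LEMMAS AND PROOFS =====

lemma pvCompLoop_iff (n j : Int) : 1 ≤ j →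
    (pvIsCompLoop n j = true ↔ ∃ m : Int, j ≤ m ∧ m * m ≤ n ∧ PySem.Int.mod n m = 0) := by
  induction j using pvIsCompLoop.induct n with
  | case1 x h hmod =>
    intro hx
    rw [pvIsCompLoop]
    simp only [h, if_pos, hmod, if_true, dite_true, true_iff]
    exact ⟨x, le_refl x, h, by simpa using hmod⟩
  | case2 x h hmod ih =>
    intro hx
    rw [pvIsCompLoop]
    simp only [h, dite_true, hmod, if_false, Bool.false_eq_true]
    rw [ih (by omega)]
    constructor
    · rintro ⟨m, hm, hmm, hmod0⟩; exact ⟨m, by omega, hmm, hmod0⟩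
    · rintro ⟨m, hm, hmm, hmod0⟩
      refine ⟨m, ?_, hmm, hmod0⟩
      rcases eq_or_lt_of_le hm with rfl | h'
      · exact absurd (by simpa using hmod0) (by simpa using hmod)
      · omega
  | case3 x h =>
    intro hx
    rw [pvIsCompLoop]
    simp only [h, dite_false]
    constructor
    · intro hF; exact absurd hF (by simp)
    rintro ⟨m, hm, hmm, _⟩
    exfalso
    have : x * x ≤ m * m := by nlinarith
    omega
abbrev pvC (d : ℕ) : Prop := 2 ≤ d ∧ ¬ d.Prime

lemma pvNatComp_iff (N : ℕ) (h2 : 2 ≤ N) :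
    (∃ M : ℕ, 2 ≤ M ∧ M * M ≤ N ∧ M ∣ N) ↔ ¬ N.Prime := by
  rw [Nat.prime_def_le_sqrt]
  push_neg
  constructor
  · rintro ⟨M, hM2, hMM, hMd⟩
    exact fun _ => ⟨M, hM2, Nat.le_sqrt.mpr hMM, hMd⟩
  · rintro h
    obtain ⟨M, hM2, hMs, hMd⟩ := h h2
    exact ⟨M, hM2, Nat.le_sqrt.mp hMs, hMd⟩

lemma pvIsComposite_iff (n : Int) (hn : 1 ≤ n) : pvIsComposite n = true ↔ pvC n.toNat := by
  rcases eq_or_lt_of_le hn with rfl | h1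
  · constructor
    · intro hF
      rw [pvIsComposite, pvIsCompLoop] at hF
      norm_num at hF
    · rintro ⟨h2, -⟩; omega
  · have h2 : 2 ≤ n := h1
    have hcast : ((n.toNat : ℤ)) = n := Int.toNat_of_nonneg (by omega)
    rw [pvIsComposite, pvCompLoop_iff n 2 (by omega)]
    have hbr : (∃ m : Int, 2 ≤ m ∧ m * m ≤ n ∧ PySem.Int.mod n m = 0)
        ↔ (∃ M : ℕ, 2 ≤ M ∧ M * M ≤ n.toNat ∧ M ∣ n.toNat) := by
      constructor
      · rintro ⟨m, hm2, hmm, hmod⟩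
        have hdvd : m ∣ n := (PySem.Int.mod_eq_zero_iff_dvd n m).mp hmod
        have hmn : ((m.toNat : ℤ)) = m := Int.toNat_of_nonneg (by omega)
        refine ⟨m.toNat, by omega, ?_, ?_⟩
        · have hq : ((m.toNat : ℤ)) * ((m.toNat : ℤ)) ≤ ((n.toNat : ℤ)) := by
            rw [hmn, hcast]; exact hmm
          exact_mod_cast hq
        · have hq : (m.toNat : ℤ) ∣ (n.toNat : ℤ) := by rwa [hmn, hcast]
          exact_mod_cast hq
      · rintro ⟨M, hM2, hMM, hMd⟩
        refine ⟨(M : ℤ), by omega, ?_, ?_⟩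
        · have hq : ((M * M : ℕ) : ℤ) ≤ ((n.toNat : ℤ)) := by exact_mod_cast hMM
          rw [hcast] at hq; push_cast at hq; exact hq
        · rw [PySem.Int.mod_eq_zero_iff_dvd, ← hcast]
          exact_mod_cast hMd
    rw [hbr, pvNatComp_iff n.toNat (by omega)]
    constructor
    · exact fun hp => ⟨by omega, hp⟩
    · exact fun hp => hp.2


lemma pvCheckC_false_iff (i : Int) (l : List Int) :
    pvCheckC i l = false ↔ ∃ j ∈ l, PySem.Int.mod i j = 0 := by
  induction l with
  | nil => simp [pvCheckC]
  | cons j rest ih =>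
    by_cases h : PySem.Int.mod i j = 0 <;> simp [pvCheckC, h, ih]

lemma pvCondA_iff (num i : Int) (hi : 2 ≤ i) :
    ((!pvCheckC i (PySem.List.pyRange 2 i 1)) && (PySem.Int.mod num i == 0)) = true
      ↔ pvC i.toNat ∧ i ∣ num := by
  simp only [Bool.and_eq_true, Bool.not_eq_true', beq_iff_eq]
  rw [pvCheckC_false_iff, PySem.Int.mod_eq_zero_iff_dvd]
  have hcast : ((i.toNat : ℤ)) = i := Int.toNat_of_nonneg (by omega)
  constructor
  · rintro ⟨⟨j, hjmem, hjmod⟩, hdvd⟩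
    rw [PySem.List.mem_pyRange_one] at hjmem
    have hjdvd : j ∣ i := (PySem.Int.mod_eq_zero_iff_dvd i j).mp hjmod
    refine ⟨⟨by omega, fun hp => ?_⟩, hdvd⟩
    have hjn : (j.toNat : ℤ) ∣ (i.toNat : ℤ) := by
      rw [Int.toNat_of_nonneg (by omega), hcast]; exact hjdvd
    have := (Nat.prime_def_lt.mp hp).2 j.toNat (by omega) (by exact_mod_cast hjn)
    omega
  · rintro ⟨⟨h2, hnp⟩, hdvd⟩
    refine ⟨?_, hdvd⟩
    rw [Nat.prime_def_lt] at hnp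
    push_neg at hnp
    obtain ⟨m, hmlt, hmdvd, hm1⟩ := hnp (by omega)
    have hm0 : m ≠ 0 := by rintro rfl; simp at hmdvd; omega
    refine ⟨(m : ℤ), ?_, ?_⟩
    · rw [PySem.List.mem_pyRange_one]; omega
    · rw [PySem.Int.mod_eq_zero_iff_dvd, ← hcast]; exact_mod_cast hmdvd
def pvContrib (n e : ℕ) : ℤ :=
  if e ∣ n then
    (if pvC e then (e : ℤ) else 0) + (if n / e ≠ e ∧ pvC (n / e) then ((n / e : ℕ) : ℤ) else 0)
  else 0

lemma pvSumA (num : Int) (h : 2 ≤ num) :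
    sum_not_simple num
      = ∑ i ∈ Finset.Icc 2 num.toNat, (if pvC i ∧ i ∣ num.toNat then (i : ℤ) else 0) := by
  have hcast : ((num.toNat : ℤ)) = num := Int.toNat_of_nonneg (by omega)
  unfold sum_not_simple
  have hfun : (fun (s i : ℤ) =>
        let c := pvCheckC i (PySem.List.pyRange 2 i 1)
        if !c && (PySem.Int.mod num i == 0) then s + i else s)
      = fun s i => s + (if ((!pvCheckC i (PySem.List.pyRange 2 i 1))
            && (PySem.Int.mod num i == 0)) = true then i else 0) := by
    funext s i; simp only []; split_ifs <;> simp_all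
  rw [hfun, PySem.List.foldl_add, zero_add, PySem.List.pyRange_one, List.map_map]
  have hlist : ∀ (K : ℕ) (f : ℕ → ℤ), ((List.range K).map f).sum = ∑ k ∈ Finset.range K, f k :=
    fun K f => rfl
  rw [hlist]
  have hIcc : Finset.Icc 2 num.toNat = Finset.Ico 2 (num.toNat + 1) := by
    ext x; simp only [Finset.mem_Icc, Finset.mem_Ico]; omega
  rw [hIcc, Finset.sum_Ico_eq_sum_range]
  have hK : (num + 1 - 2).toNat = num.toNat + 1 - 2 := by omega
  rw [hK]
  apply Finset.sum_congr rfl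
  intro k hk
  simp only [Function.comp_apply]
  have hi2 : (2:ℤ) ≤ 2 + (k:ℤ) := by omega
  have htn : ((2:ℤ) + (k:ℤ)).toNat = 2 + k := by omega
  by_cases hcond : ((!pvCheckC (2 + (k:ℤ)) (PySem.List.pyRange 2 (2 + (k:ℤ)) 1))
      && (PySem.Int.mod num (2 + (k:ℤ)) == 0)) = true
  · rw [if_pos hcond]
    rw [pvCondA_iff num _ hi2, htn] at hcond
    have hdvd : (2 + k) ∣ num.toNat := by
      have := hcond.2
      rw [← hcast] at this
      exact_mod_cast (by push_cast at this ⊢; exact this : ((2+k : ℕ):ℤ) ∣ ((num.toNat : ℕ):ℤ))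
    rw [if_pos ⟨hcond.1, hdvd⟩]
    push_cast; ring
  · rw [if_neg hcond]
    rw [pvCondA_iff num _ hi2, htn] at hcond
    have : ¬ (pvC (2 + k) ∧ (2 + k) ∣ num.toNat) := by
      intro ⟨h1, h2⟩
      apply hcond
      refine ⟨h1, ?_⟩
      have : ((2+k : ℕ):ℤ) ∣ ((num.toNat : ℕ):ℤ) := by exact_mod_cast h2
      rw [hcast] at this; push_cast at this; exact this
    rw [if_neg this]

lemma pvAltLoop_stop (num d t : Int) (h2 : 2 ≤ num) (hd : 1 ≤ d) (hg : ¬ d * d ≤ num) :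
    pvAltLoop num d t
      = t + ∑ e ∈ Finset.Ico d.toNat (Nat.sqrt num.toNat + 1), pvContrib num.toNat e := by
  have hcast : ((num.toNat : ℤ)) = num := Int.toNat_of_nonneg (by omega)
  rw [pvAltLoop]
  simp only [hg, dite_false]
  have hlt : Nat.sqrt num.toNat < d.toNat := by
    rw [Nat.sqrt_lt']
    have hx : ((num.toNat : ℕ) : ℤ) < ((d.toNat * d.toNat : ℕ) : ℤ) := by
      push_cast
      rw [Int.toNat_of_nonneg (by omega : (0:ℤ) ≤ d), hcast]
      exact not_le.mp hg
    calc num.toNat < d.toNat * d.toNat := by exact_mod_cast hx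
      _ = d.toNat ^ 2 := by ring
  rw [Finset.Ico_eq_empty (by omega), Finset.sum_empty, add_zero]

lemma pvAltLoop_step (num d total : Int) (h2 : 2 ≤ num) (hd : 1 ≤ d) (hguard : d * d ≤ num) :
    (if PySem.Int.mod num d == 0 then
        (let t2 := if pvIsComposite d then total + d else total;
         let q := PySem.Int.floordiv num d;
         if q ≠ d && pvIsComposite q then t2 + q else t2)
      else total) = total + pvContrib num.toNat d.toNat := by
  have hcast : ((num.toNat : ℤ)) = num := Int.toNat_of_nonneg (by omega)
  have hce : ((d.toNat : ℤ)) = d := Int.toNat_of_nonneg (by omega)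
  by_cases hdvd : d ∣ num
  · have hmod : (PySem.Int.mod num d == 0) = true := by
      simp [PySem.Int.mod_eq_zero_iff_dvd, hdvd]
    have hdvdN : d.toNat ∣ num.toNat := by
      have : ((d.toNat : ℤ)) ∣ ((num.toNat : ℤ)) := by rw [hce, hcast]; exact hdvd
      exact_mod_cast this
    have hq : PySem.Int.floordiv num d = ((num.toNat / d.toNat : ℕ) : ℤ) := by
      rw [← hcast, ← hce, PySem.Int.floordiv_natCast]; simp
    have hq1 : (1:ℤ) ≤ PySem.Int.floordiv num d := by
      rw [hq]
      have : 0 < num.toNat / d.toNat := Nat.div_pos (Nat.le_of_dvd (by omega) hdvdN) (by omega)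
      exact_mod_cast this
    have hqt : (PySem.Int.floordiv num d).toNat = num.toNat / d.toNat := by
      rw [hq]; omega
    rw [hmod, if_pos rfl]
    simp only []
    unfold pvContrib
    rw [if_pos hdvdN]
    have hcd : pvIsComposite d = true ↔ pvC d.toNat := pvIsComposite_iff d (by omega)
    have hcq : pvIsComposite (PySem.Int.floordiv num d) = true
        ↔ pvC (num.toNat / d.toNat) := by
      rw [pvIsComposite_iff _ hq1, hqt]
    have hne : (PySem.Int.floordiv num d ≠ d) ↔ (num.toNat / d.toNat ≠ d.toNat) := by
      rw [hq, ← hce]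
      constructor
      · intro hx hy; exact hx (by exact_mod_cast hy)
      · intro hx hy; exact hx (by exact_mod_cast hy)
    have hbig : ((PySem.Int.floordiv num d ≠ d) && pvIsComposite (PySem.Int.floordiv num d)) = true
        ↔ (num.toNat / d.toNat ≠ d.toNat ∧ pvC (num.toNat / d.toNat)) := by
      simp only [Bool.and_eq_true, decide_eq_true_iff]
      rw [hne, hcq]
    simp only [hcd, hbig]
    rw [hq]
    split_ifs <;> omega
  · have hmod : (PySem.Int.mod num d == 0) = false := by
      simp [PySem.Int.mod_eq_zero_iff_dvd, hdvd]
    have hdvdN : ¬ d.toNat ∣ num.toNat := by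
      intro hx
      apply hdvd
      have : ((d.toNat : ℤ)) ∣ ((num.toNat : ℤ)) := by exact_mod_cast hx
      rwa [hce, hcast] at this
    rw [hmod]
    unfold pvContrib
    rw [if_neg hdvdN]
    simp

lemma pvAltLoop_eq (num : Int) (h2 : 2 ≤ num) : ∀ (k : ℕ) (d t : Int), 1 ≤ d →
    (num + 1 - d).toNat ≤ k →
    pvAltLoop num d t
      = t + ∑ e ∈ Finset.Ico d.toNat (Nat.sqrt num.toNat + 1), pvContrib num.toNat e := by
  intro k
  induction k with
  | zero =>
    intro d t hd hk
    have hd' : num + 1 ≤ d := by omega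
    have hdd : d ≤ d * d := le_mul_of_one_le_left (by omega) hd
    exact pvAltLoop_stop num d t h2 hd (by intro hx; linarith)
  | succ k ihk =>
    intro d t hd hk
    by_cases hg : d * d ≤ num
    · have hce : ((d.toNat : ℤ)) = d := Int.toNat_of_nonneg (by omega)
      have hdn : (d + 1).toNat = d.toNat + 1 := by omega
      have hsq : d.toNat ≤ Nat.sqrt num.toNat := by
        apply Nat.le_sqrt.mpr
        have : ((d.toNat * d.toNat : ℕ) : ℤ) ≤ ((num.toNat : ℕ) : ℤ) := by
          push_cast
          rw [hce, Int.toNat_of_nonneg (by omega : (0:ℤ) ≤ num)]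
          exact hg
        exact_mod_cast this
      rw [pvAltLoop]
      simp only [hg, dite_true]
      have hdle : d ≤ num := by nlinarith
      rw [ihk (d + 1) _ (by omega) (by omega)]
      rw [hdn, Finset.sum_eq_sum_Ico_succ_bot (by omega : d.toNat < Nat.sqrt num.toNat + 1)]
      rw [pvAltLoop_step num d t h2 hd hg]
      ring
    · exact pvAltLoop_stop num d t h2 hd hg

lemma pvSumB (num : Int) (h : 2 ≤ num) :
    sum_not_simple_alt num
      = ∑ e ∈ Finset.Ico 1 (Nat.sqrt num.toNat + 1), pvContrib num.toNat e := by
  unfold sum_not_simple_alt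
  rw [pvAltLoop_eq num h (num.toNat) 1 0 (by omega) (by omega), zero_add]
  norm_num
lemma pvSmall (num : Int) (h : num ≤ 1) :
    sum_not_simple num = 0 ∧ sum_not_simple_alt num = 0 := by
  constructor
  · unfold sum_not_simple
    rw [PySem.List.pyRange_one_eq_nil (by omega)]
    rfl
  · unfold sum_not_simple_alt
    by_cases h1 : num = 1
    · subst h1
      have hI : pvIsComposite 1 = false := by
        have hiff := pvIsComposite_iff 1 le_rfl
        cases hx : pvIsComposite 1
        · rfl
        · have := hiff.mp hx
          simp only [Int.toNat_one] at this
          omega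
      rw [pvAltLoop]
      norm_num [hI, show PySem.Int.mod 1 1 = 0 from by decide,
        show PySem.Int.floordiv 1 1 = 1 from by decide]
      rw [pvAltLoop]
      norm_num
    · rw [pvAltLoop]
      have hng : ¬ (1 : ℤ) ≤ num := by omega
      simp [hng]

lemma pvPairing (n : ℕ) (hn : 2 ≤ n) :
    ∑ i ∈ Finset.Icc 2 n, (if pvC i ∧ i ∣ n then (i : ℤ) else 0)
      = ∑ e ∈ Finset.Ico 1 (Nat.sqrt n + 1), pvContrib n e := by
  have hn0 : n ≠ 0 := by omega
  have hA : (Finset.Icc 2 n).filter (fun i => pvC i ∧ i ∣ n)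
      = n.divisors.filter (fun i => pvC i) := by
    ext i
    simp only [Finset.mem_filter, Finset.mem_Icc, Nat.mem_divisors]
    constructor
    · rintro ⟨⟨h2i, hin⟩, hci, hdi⟩; exact ⟨⟨hdi, hn0⟩, hci⟩
    · rintro ⟨⟨hdi, -⟩, hci⟩
      exact ⟨⟨hci.1, Nat.le_of_dvd (by omega) hdi⟩, hci, hdi⟩
  have hsplit : ∀ e ∈ Finset.Ico 1 (Nat.sqrt n + 1), pvContrib n e
      = (if e ∣ n ∧ pvC e then (e : ℤ) else 0)
        + (if e ∣ n ∧ (n / e ≠ e ∧ pvC (n / e)) then ((n / e : ℕ) : ℤ) else 0) := by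
    intro e _
    unfold pvContrib
    by_cases h1 : e ∣ n <;> simp [h1]
  have hsmall : ∑ d ∈ (n.divisors.filter (fun i => pvC i)).filter (fun d => d * d ≤ n), (d : ℤ)
      = ∑ e ∈ (Finset.Ico 1 (Nat.sqrt n + 1)).filter (fun e => e ∣ n ∧ pvC e), (e : ℤ) := by
    apply Finset.sum_congr ?_ (fun _ _ => rfl)
    ext e
    simp only [Finset.mem_filter, Nat.mem_divisors, Finset.mem_Ico]
    constructor
    · rintro ⟨⟨⟨hd, -⟩, hc⟩, hsq⟩
      have he1 : 1 ≤ e := Nat.pos_of_ne_zero (by rintro rfl; exact hn0 (Nat.eq_zero_of_zero_dvd hd))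
      exact ⟨⟨he1, Nat.lt_succ_of_le (Nat.le_sqrt.mpr hsq)⟩, hd, hc⟩
    · rintro ⟨⟨he1, helt⟩, hd, hc⟩
      exact ⟨⟨⟨hd, hn0⟩, hc⟩, Nat.le_sqrt.mp (Nat.lt_succ_iff.mp helt)⟩
  have hlarge : ∑ d ∈ (n.divisors.filter (fun i => pvC i)).filter (fun d => ¬ d * d ≤ n), (d : ℤ)
      = ∑ e ∈ (Finset.Ico 1 (Nat.sqrt n + 1)).filter
            (fun e => e ∣ n ∧ (n / e ≠ e ∧ pvC (n / e))), ((n / e : ℕ) : ℤ) := by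
    refine (Finset.sum_nbij' (fun e => n / e) (fun d => n / d) ?_ ?_ ?_ ?_ ?_).symm
    · intro e he
      simp only [Finset.mem_filter, Finset.mem_Ico] at he
      obtain ⟨⟨he1, helt⟩, hdvd, hne, hc⟩ := he
      have hee : e * e ≤ n := Nat.le_sqrt.mp (Nat.lt_succ_iff.mp helt)
      have hmul : e * (n / e) = n := Nat.mul_div_cancel' hdvd
      have hle : e ≤ n / e := Nat.le_of_mul_le_mul_left (by rw [hmul]; exact hee) (by omega)
      have hlt2 : e < n / e := lt_of_le_of_ne hle (fun hx => hne hx.symm)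
      have hpos' : 0 < n / e := lt_trans (by omega : 0 < e) hlt2
      have hbig : n < (n / e) * (n / e) := by
        calc n = e * (n / e) := hmul.symm
          _ < (n / e) * (n / e) := mul_lt_mul_of_pos_right hlt2 hpos'
      simp only [Finset.mem_filter, Nat.mem_divisors]
      exact ⟨⟨⟨⟨e, (Nat.div_mul_cancel hdvd).symm⟩, hn0⟩, hc⟩,
        fun hx => absurd (lt_of_lt_of_le hbig hx) (lt_irrefl n)⟩
    · intro d hd
      simp only [Finset.mem_filter, Nat.mem_divisors] at hd
      obtain ⟨⟨⟨hdvd, -⟩, hc⟩, hbig⟩ := hd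
      have hd2 : 2 ≤ d := hc.1
      have hmul : d * (n / d) = n := Nat.mul_div_cancel' hdvd
      have hpos : 0 < n / d := Nat.div_pos (Nat.le_of_dvd (by omega) hdvd) (by omega)
      have hlt : n / d < d := by
        by_contra hx
        push_neg at hx
        have hdd : d * d ≤ d * (n / d) := Nat.mul_le_mul_left d hx
        exact hbig (hmul ▸ hdd)
      have hsq : n / d ≤ Nat.sqrt n := by
        apply Nat.le_sqrt.mpr
        calc (n / d) * (n / d) ≤ (n / d) * d := Nat.mul_le_mul_left _ (le_of_lt hlt)
          _ = d * (n / d) := by ring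
          _ = n := hmul
      have hself : n / (n / d) = d := Nat.div_div_self hdvd hn0
      simp only [Finset.mem_filter, Finset.mem_Ico]
      refine ⟨⟨hpos, Nat.lt_succ_of_le hsq⟩, ⟨d, (Nat.div_mul_cancel hdvd).symm⟩, ?_, ?_⟩
      · rw [hself]; exact ne_of_gt hlt
      · rw [hself]; exact hc
    · intro e he
      simp only [Finset.mem_filter, Finset.mem_Ico] at he
      exact Nat.div_div_self he.2.1 hn0
    · intro d hd
      simp only [Finset.mem_filter, Nat.mem_divisors] at hd
      exact Nat.div_div_self hd.1.1.1 hn0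
    · intro e _; rfl
  rw [← Finset.sum_filter, hA]
  rw [← Finset.sum_filter_add_sum_filter_not (n.divisors.filter (fun i => pvC i))
        (fun d => d * d ≤ n) (fun d => (d : ℤ))]
  rw [hsmall, hlarge, Finset.sum_filter, Finset.sum_filter]
  rw [← Finset.sum_add_distrib]
  exact (Finset.sum_congr rfl hsplit).symm


-- ===== VERDICT (by name: the statement is the Claim_ definition above) =====
theorem sum_not_simple_spec : Claim_equal_sum_not_simple := by
  intro num _
  show sum_not_simple num = sum_not_simple_alt num
  by_cases h : num ≤ 1
  · rw [(pvSmall num h).1, (pvSmall num h).2]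
  · have h2 : 2 ≤ num := by omega
    rw [pvSumA num h2, pvSumB num h2, pvPairing num.toNat (by omega)]
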